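-- pv_equiv track=rewrite | github.com/artemius-warp-dev/sde_crusade | relative_sorting.py | relativeSort
-- ===== SOURCE A (Python) =====
-- def relativeSort (A1, N, A2, M):
--     hm = {}
--     res = []
--
--     for e in A1:
--         if e not in hm:
--             hm[e] = 1
--         else:
--             hm[e]+=1
--     for e in A2:
--         if e not in hm:
--             continue
--         res.extend([e] * hm[e])
--
--         hm[e] = 0
--
--     rem = []
--     for key in hm:
--         if hm[key] != 0:
--             rem.append(key)
--
--     rem.sort()
--
--     for e in rem:
--         res.extend([e] * hm[e])
--
--     return res
-- ===== SOURCE B (Python) =====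
-- def relativeSort(A1, N, A2, M):
--     rank = {}
--     for i, e in enumerate(A2):
--         if e not in rank:
--             rank[e] = i
--     n = len(A2)
--     return sorted(A1, key=lambda x: (rank.get(x, n), x))
-- ===== Notes on version B (the rewrite author's own statement) =====
-- stated objective: idiomatic
-- what changed: A counts occurrences in a dict, emits A2-ordered groups by repeated extend, then separately sorts and emits the leftovers; B builds a first-occurrence rank index over A2 once and returns sorted(A1, key=lambda x: (rank.get(x, len(A2)), x)) - a single composite-key sort with no counting, no group emission and no second sort.
import Mathlib
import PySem

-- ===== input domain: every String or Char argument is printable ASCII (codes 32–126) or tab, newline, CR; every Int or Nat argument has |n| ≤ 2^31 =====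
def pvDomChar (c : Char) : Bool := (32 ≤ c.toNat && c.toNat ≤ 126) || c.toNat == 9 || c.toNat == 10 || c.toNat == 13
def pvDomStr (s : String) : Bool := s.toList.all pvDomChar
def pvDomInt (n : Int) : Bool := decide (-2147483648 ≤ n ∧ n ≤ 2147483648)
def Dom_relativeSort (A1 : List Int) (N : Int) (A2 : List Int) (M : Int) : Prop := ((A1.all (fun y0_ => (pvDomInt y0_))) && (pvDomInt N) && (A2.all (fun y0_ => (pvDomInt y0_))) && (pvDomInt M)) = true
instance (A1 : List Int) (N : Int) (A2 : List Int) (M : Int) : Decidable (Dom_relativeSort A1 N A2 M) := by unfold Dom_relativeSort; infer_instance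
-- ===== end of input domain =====

-- B replaces A's count-dict + group-emission + separate leftover sort by one composite-key
-- sort (first-A2-rank-or-len(A2), value) over A1 (objective: idiomatic).

-- ===== PORT A =====
-- first loop: build the occurrence-count dict
def pvCountStep (hm : PySem.Dict Int Int) (e : Int) : PySem.Dict Int Int :=
  if hm.contains e then hm.insert e (hm.getD e 0 + 1) else hm.insert e 1

-- second loop: emit each A2 element's whole group, zeroing its count
def pvEmitStep (acc : List Int × PySem.Dict Int Int) (e : Int) : List Int × PySem.Dict Int Int :=
  if acc.2.contains e then (acc.1 ++ PySem.List.pyRepeat [e] (acc.2.getD e 0), acc.2.insert e 0)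
  else acc

def relativeSort (A1 : List Int) (N : Int) (A2 : List Int) (M : Int) : List Int :=
  let hm := A1.foldl pvCountStep PySem.Dict.empty
  let p := A2.foldl pvEmitStep ([], hm)
  let rem := p.2.keys.foldl (fun rem k => if p.2.getD k 0 != 0 then rem ++ [k] else rem) []
  let rem' := PySem.List.sorted rem (fun x => x) false
  rem'.foldl (fun res e => res ++ PySem.List.pyRepeat [e] (p.2.getD e 0)) p.1

-- ===== PORT B =====
-- rank loop: first-occurrence index of each A2 value
def pvRankStep (d : PySem.Dict Int Int) (p : Int × Int) : PySem.Dict Int Int :=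
  if d.contains p.2 then d else d.insert p.2 p.1

def relativeSort_alt (A1 : List Int) (N : Int) (A2 : List Int) (M : Int) : List Int :=
  let rank := (PySem.List.enumerate A2).foldl pvRankStep PySem.Dict.empty
  let n := PySem.List.len A2
  PySem.List.sorted2 A1 (fun x => rank.getD x n) (fun x => x) false

-- ===== PRECONDITION & SPEC =====
def Spec_relativeSort (A1 : List Int) (N : Int) (A2 : List Int) (M : Int) (out : List Int) : Prop := out = relativeSort_alt A1 N A2 M
instance (A1 : List Int) (N : Int) (A2 : List Int) (M : Int) (out : List Int) : Decidable (Spec_relativeSort A1 N A2 M out) := by unfold Spec_relativeSort; infer_instance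

-- ===== CLAIM (what is proved, stated in full; the proofs are below) =====
def Claim_equal_relativeSort : Prop := ∀ (A1 : List Int) (N : Int) (A2 : List Int) (M : Int), Dom_relativeSort A1 N A2 M → Spec_relativeSort A1 N A2 M (relativeSort A1 N A2 M)

-- ===== LEMMAS AND PROOFS =====

-- the composite sort key B uses, written closed-form
def pvKey (A2 : List Int) (x : Int) : Lex (Int × Int) :=
  toLex (if x ∈ A2 then (A2.idxOf x : Int) else (A2.length : Int), x)

def pvBlock (A1 : List Int) (e : Int) : List Int := List.replicate (A1.count e) e

lemma pvCountStep_eq : pvCountStep = fun hm e => hm.insert e (hm.getD e 0 + 1) := by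
  funext hm e
  unfold pvCountStep
  by_cases hc : hm.contains e = true
  · simp [hc]
  · have h0 : hm.getD e 0 = 0 := PySem.Dict.getD_of_not_contains hm 0 (by simpa using hc)
    simp [hc, h0]

lemma pvEmitStep_apply (res : List Int) (d : PySem.Dict Int Int) (e : Int) :
    pvEmitStep (res, d) e =
      if d.contains e = true then (res ++ PySem.List.pyRepeat [e] (d.getD e 0), d.insert e 0)
      else (res, d) := rfl

lemma pvRankStep_apply (d : PySem.Dict Int Int) (s x : Int) :
    pvRankStep d (s, x) = if d.contains x = true then d else d.insert x s := rfl

lemma pvCount_getD (A1 : List Int) (v : Int) :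
    (A1.foldl pvCountStep PySem.Dict.empty).getD v 0 = (A1.count v : Int) := by
  rw [pvCountStep_eq]
  simpa using PySem.Dict.getD_foldl_insert_add_one A1 PySem.Dict.empty v

lemma pvCount_keys (A1 : List Int) :
    (A1.foldl pvCountStep PySem.Dict.empty).keys = PySem.Set.ofList A1 := by
  rw [pvCountStep_eq, PySem.Dict.keys_foldl_insert, PySem.Set.ofList_eq_foldl]
  rfl

lemma pvCount_contains (A1 : List Int) (v : Int) :
    (A1.foldl pvCountStep PySem.Dict.empty).contains v = decide (v ∈ A1) := by
  rw [PySem.Dict.contains_eq_decide_mem_keys, pvCount_keys]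
  simp [PySem.Set.mem_ofList]

lemma pvEmit_keys (suf : List Int) : ∀ (res : List Int) (d : PySem.Dict Int Int),
    (suf.foldl pvEmitStep (res, d)).2.keys = d.keys := by
  induction suf with
  | nil => intro res d; rfl
  | cons x t ih =>
    intro res d
    rw [List.foldl_cons, pvEmitStep_apply]
    by_cases hx : d.contains x = true
    · rw [if_pos hx, ih]
      exact PySem.Dict.keys_insert_of_contains d 0 hx
    · rw [if_neg hx, ih]

lemma pvEmit_snd (suf : List Int) : ∀ (res : List Int) (d : PySem.Dict Int Int) (v : Int),
    (suf.foldl pvEmitStep (res, d)).2.getD v 0 =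
      if v ∈ suf ∧ d.contains v = true then 0 else d.getD v 0 := by
  induction suf with
  | nil => intro res d v; simp
  | cons x t ih =>
    intro res d v
    rw [List.foldl_cons, pvEmitStep_apply]
    by_cases hx : d.contains x = true
    · rw [if_pos hx, ih]
      by_cases hvx : v = x
      · subst hvx
        have h1 : (d.insert v 0).contains v = true := by simp
        have h2 : (d.insert v 0).getD v 0 = 0 := by simp
        by_cases hvt : v ∈ t <;> simp [h1, h2, hx, hvt]
      · have h1 : (d.insert x 0).contains v = d.contains v := by
          simp [PySem.Dict.contains_insert, hvx]
        have h2 : (d.insert x 0).getD v 0 = d.getD v 0 := by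
          simp [PySem.Dict.getD_insert, hvx]
        simp [h1, h2, List.mem_cons, hvx]
    · rw [if_neg hx, ih]
      by_cases hvx : v = x
      · subst hvx
        simp [hx]
      · simp [List.mem_cons, hvx]

lemma pvFlatMap_filter (x : Int) (f g : Int → List Int)
    (hfg : ∀ e, e ≠ x → f e = g e) (hgx : g x = []) :
    ∀ L : List Int, (L.filter (fun y => !(y == x))).flatMap f = L.flatMap g := by
  intro L
  induction L with
  | nil => simp
  | cons y t ih =>
    by_cases hy : y = x
    · subst hy
      simpa [hgx] using ih
    · have hb : (y == x) = false := by simp [hy]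
      simp [hb, ih, hfg y hy]

lemma pvEmit_fst (c : Int → Int) : ∀ (suf res : List Int) (d : PySem.Dict Int Int) (Z : Int → Bool),
    (∀ v, d.getD v 0 = if Z v then 0 else c v) →
    (∀ v, d.contains v = false → c v = 0) →
    (suf.foldl pvEmitStep (res, d)).1 =
      res ++ (PySem.Set.ofList suf).flatMap
        (fun e => if Z e then [] else List.replicate (c e).toNat e) := by
  intro suf
  induction suf with
  | nil => intro res d Z hgd hcf; simp
  | cons x t ih =>
    intro res d Z hgd hcf
    rw [List.foldl_cons, pvEmitStep_apply, PySem.Set.ofList_cons, List.flatMap_cons]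
    by_cases hx : d.contains x = true
    · rw [if_pos hx]
      rw [ih (res ++ PySem.List.pyRepeat [x] (d.getD x 0)) (d.insert x 0)
          (fun v => (v == x) || Z v) ?_ ?_]
      · have hblock : PySem.List.pyRepeat [x] (d.getD x 0) =
            (if Z x then [] else List.replicate (c x).toNat x) := by
          rw [PySem.List.pyRepeat_singleton, hgd x]
          by_cases hZ : Z x <;> simp [hZ]
        have hfm : ((PySem.Set.ofList t).discard x).flatMap
              (fun e => if Z e then [] else List.replicate (c e).toNat e) =
            (PySem.Set.ofList t).flatMap
              (fun e => if ((e == x) || Z e) then [] else List.replicate (c e).toNat e) := by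
          show (List.filter (fun y => !(y == x)) (PySem.Set.ofList t)).flatMap _ = _
          refine pvFlatMap_filter x _ _ ?_ ?_ _
          · intro e he
            have : (e == x) = false := by simp [he]
            simp [this]
          · simp
        rw [hfm, ← hblock, List.append_assoc]
      · intro v
        by_cases hvx : v = x
        · subst hvx; simp
        · simp [PySem.Dict.getD_insert, hvx, hgd v]
      · intro v hv
        rw [PySem.Dict.contains_insert] at hv
        exact hcf v (by simpa using (Bool.or_eq_false_iff.mp hv).2)
    · rw [if_neg hx]
      rw [ih res d Z hgd hcf]
      have hcx : c x = 0 := hcf x (by simpa using hx)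
      have hfx : (if Z x then ([] : List Int) else List.replicate (c x).toNat x) = [] := by
        by_cases hZ : Z x <;> simp [hZ, hcx]
      have hfm : ((PySem.Set.ofList t).discard x).flatMap
            (fun e => if Z e then [] else List.replicate (c e).toNat e) =
          (PySem.Set.ofList t).flatMap
            (fun e => if Z e then [] else List.replicate (c e).toNat e) := by
        show (List.filter (fun y => !(y == x)) (PySem.Set.ofList t)).flatMap _ = _
        exact pvFlatMap_filter x _ _ (fun _ _ => rfl) hfx _
      rw [hfm, hfx]
      simp

lemma pvOfList_idxOf (l : List Int) :
    (PySem.Set.ofList l).Pairwise (fun a b => l.idxOf a < l.idxOf b) := by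
  induction l using List.reverseRecOn with
  | nil => simp [PySem.Set.ofList_nil]
  | append_singleton xs x ih =>
    rw [PySem.Set.ofList_append_singleton]
    have hlift : (PySem.Set.ofList xs).Pairwise
        (fun a b => (xs ++ [x]).idxOf a < (xs ++ [x]).idxOf b) := by
      refine List.Pairwise.imp_of_mem ?_ ih
      intro a b ha hb hab
      have haxs : a ∈ xs := (PySem.Set.mem_ofList xs a).mp ha
      have hbxs : b ∈ xs := (PySem.Set.mem_ofList xs b).mp hb
      rwa [List.idxOf_append, if_pos haxs, List.idxOf_append, if_pos hbxs]
    by_cases hx : x ∈ xs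
    · have hc : (PySem.Set.ofList xs).contains x = true := by
        simp [PySem.Set.mem_ofList, hx]
      show List.Pairwise _ (PySem.Set.add (PySem.Set.ofList xs) x)
      unfold PySem.Set.add
      rw [if_pos hc]
      exact hlift
    · have hc : (PySem.Set.ofList xs).contains x = false := by
        simp [PySem.Set.mem_ofList, hx]
      show List.Pairwise _ (PySem.Set.add (PySem.Set.ofList xs) x)
      unfold PySem.Set.add
      rw [if_neg (by simp [PySem.Set.mem_ofList, hx])]
      rw [List.pairwise_append]
      refine ⟨hlift, by simp, ?_⟩
      intro a ha b hb
      have haxs : a ∈ xs := (PySem.Set.mem_ofList xs a).mp ha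
      have hb' : b = x := by simpa using hb
      subst hb'
      rw [List.idxOf_append, if_pos haxs, List.idxOf_append, if_neg hx]
      have := List.idxOf_lt_length_of_mem haxs
      simp
      omega

lemma pvCount_flatMap_blocks (c : Int → Nat) :
    ∀ (L : List Int) (v : Int), L.Nodup →
      (L.flatMap (fun e => List.replicate (c e) e)).count v = if v ∈ L then c v else 0 := by
  intro L
  induction L with
  | nil => simp
  | cons y t ih =>
    intro v hnd
    have hyt : y ∉ t := (List.nodup_cons.mp hnd).1
    rw [List.flatMap_cons, List.count_append, ih v (List.nodup_cons.mp hnd).2]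
    by_cases hvy : v = y
    · subst hvy
      simp [hyt]
    · simp [List.count_replicate, hvy, List.mem_cons, Ne.symm hvy]

lemma pvRank_getD (l : List Int) : ∀ (s : Int) (d : PySem.Dict Int Int) (v dflt : Int),
    ((PySem.List.enumerate l s).foldl pvRankStep d).getD v dflt =
      if d.contains v = true then d.getD v dflt
      else if v ∈ l then s + (l.idxOf v : Int) else dflt := by
  induction l with
  | nil =>
    intro s d v dflt
    by_cases hc : d.contains v = true
    · simp [PySem.List.enumerate, hc]
    · simp [PySem.List.enumerate, hc,
        PySem.Dict.getD_of_not_contains d dflt (by simpa using hc)]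
  | cons x t ih =>
    intro s d v dflt
    rw [PySem.List.enumerate_cons, List.foldl_cons, pvRankStep_apply]
    by_cases hx : d.contains x = true
    · rw [if_pos hx, ih]
      by_cases hvx : v = x
      · subst hvx
        simp [hx]
      · by_cases hc : d.contains v = true
        · simp [hc]
        · rw [if_neg hc, if_neg hc]
          simp only [List.mem_cons, hvx, false_or]
          by_cases hvt : v ∈ t
          · rw [if_pos hvt, if_pos hvt, List.idxOf_cons_ne _ (fun h => hvx h.symm)]
            push_cast
            ring
          · rw [if_neg hvt, if_neg hvt]
    · rw [if_neg hx, ih]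
      by_cases hvx : v = x
      · subst hvx
        have hc' : (d.insert v s).contains v = true := by simp
        have hg' : (d.insert v s).getD v dflt = s := by simp
        simp [hc', hg', hx, List.idxOf_cons_self]
      · have hc' : (d.insert x s).contains v = d.contains v := by
          simp [PySem.Dict.contains_insert, hvx]
        have hg' : (d.insert x s).getD v dflt = d.getD v dflt := by
          simp [PySem.Dict.getD_insert, hvx]
        rw [hc', hg']
        by_cases hc : d.contains v = true
        · simp [hc]
        · rw [if_neg hc, if_neg hc]
          simp only [List.mem_cons, hvx, false_or]
          by_cases hvt : v ∈ t
          · rw [if_pos hvt, if_pos hvt, List.idxOf_cons_ne _ (fun h => hvx h.symm)]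
            push_cast
            ring
          · rw [if_neg hvt, if_neg hvt]

lemma pvSorted2_eq (xs : List Int) (k1 : Int → Int) :
    PySem.List.sorted2 xs k1 (fun x => x) false =
      PySem.List.sorted xs (fun x => toLex (k1 x, x)) false := by
  have h2 : PySem.List.sorted2 xs k1 (fun x => x) false =
      xs.foldl (fun acc x => PySem.List.insertBy
        (fun a b => decide (k1 a < k1 b) || (!decide (k1 b < k1 a) && decide (a < b))) x acc) [] := rfl
  rw [h2, PySem.List.sorted_eq_foldl_insertBy]
  have hcmp : ∀ a b : Int,
      (decide (k1 a < k1 b) || (!decide (k1 b < k1 a) && decide (a < b))) =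
        decide (toLex (k1 a, a) < toLex (k1 b, b)) := by
    intro a b
    rcases lt_trichotomy (k1 a) (k1 b) with h | h | h
    · simp [Prod.Lex.lt_iff, h]
    · simp [Prod.Lex.lt_iff, h]
    · simp [Prod.Lex.lt_iff, not_lt.mpr h.le, h.ne', h]
  simp only [hcmp]

lemma pvKey_injective (A2 : List Int) : Function.Injective (pvKey A2) := by
  intro a b h
  have := congrArg (fun p : Lex (Int × Int) => (ofLex p).2) h
  simpa [pvKey] using this

-- B's output is sorted A1 by pvKey
lemma pvRepPairwise (A2 : List Int) (n : Nat) (e : Int) :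
    (List.replicate n e).Pairwise (fun a b => pvKey A2 a ≤ pvKey A2 b) := by
  induction n with
  | zero => simp
  | succ m ih =>
    rw [List.replicate_succ]
    refine List.Pairwise.cons ?_ ih
    intro y hy
    rw [List.eq_of_mem_replicate hy]

lemma pvAlt_eq (A1 N A2 M) :
    relativeSort_alt A1 N A2 M = PySem.List.sorted A1 (pvKey A2) false := by
  show PySem.List.sorted2 A1
      (fun x => ((PySem.List.enumerate A2).foldl pvRankStep PySem.Dict.empty).getD x
        (PySem.List.len A2)) (fun x => x) false = _
  have hk : (fun x => ((PySem.List.enumerate A2).foldl pvRankStep PySem.Dict.empty).getD x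
      (PySem.List.len A2)) =
      fun x => (if x ∈ A2 then (A2.idxOf x : Int) else (A2.length : Int)) := by
    funext x
    rw [pvRank_getD A2 0 PySem.Dict.empty x (PySem.List.len A2)]
    by_cases hx : x ∈ A2 <;> simp [hx, PySem.List.len]
  rw [hk, pvSorted2_eq]
  have hk2 : (fun x => toLex ((if x ∈ A2 then (A2.idxOf x : Int) else (A2.length : Int)), x)) =
      pvKey A2 := by
    funext x
    simp [pvKey]
  rw [hk2]

-- A's output in closed form
lemma pvA_eq (A1 N A2 M) :
    relativeSort A1 N A2 M =
      (PySem.Set.ofList A2).flatMap (pvBlock A1) ++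
      (PySem.List.sorted ((PySem.Set.ofList A1).filter (fun k => !decide (k ∈ A2))) (fun x => x) false).flatMap (pvBlock A1) := by
  have key0 : relativeSort A1 N A2 M =
      (PySem.List.sorted
        ((A2.foldl pvEmitStep ([], A1.foldl pvCountStep PySem.Dict.empty)).2.keys.foldl
          (fun rem k =>
            if (A2.foldl pvEmitStep ([], A1.foldl pvCountStep PySem.Dict.empty)).2.getD k 0 != 0
            then rem ++ [k] else rem) [])
        (fun x => x) false).foldl
        (fun res e => res ++ PySem.List.pyRepeat [e]
          ((A2.foldl pvEmitStep ([], A1.foldl pvCountStep PySem.Dict.empty)).2.getD e 0))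
        (A2.foldl pvEmitStep ([], A1.foldl pvCountStep PySem.Dict.empty)).1 := rfl
  rw [key0]
  set p := A2.foldl pvEmitStep ([], A1.foldl pvCountStep PySem.Dict.empty) with hp2
  have hgd : ∀ v, p.2.getD v 0 = if v ∈ A2 ∧ v ∈ A1 then 0 else (A1.count v : Int) := by
    intro v
    rw [hp2, pvEmit_snd A2 [] _ v, pvCount_contains, pvCount_getD]
    by_cases h2 : v ∈ A2 <;> by_cases h1 : v ∈ A1 <;> simp [h1, h2]
  have hkeys : p.2.keys = PySem.Set.ofList A1 := by
    rw [hp2, pvEmit_keys A2 [] _, pvCount_keys]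
  have hp1 : p.1 = (PySem.Set.ofList A2).flatMap (pvBlock A1) := by
    rw [hp2, pvEmit_fst (fun v => (A1.count v : Int)) A2 [] _ (fun _ => false)
      (fun v => by simpa using pvCount_getD A1 v)
      (fun v hv => by
        rw [pvCount_contains] at hv
        have hnv : v ∉ A1 := by simpa using hv
        simp [List.count_eq_zero.mpr hnv])]
    simp
    rfl
  have hrem : p.2.keys.foldl (fun rem k => if p.2.getD k 0 != 0 then rem ++ [k] else rem) [] =
      (PySem.Set.ofList A1).filter (fun k => !decide (k ∈ A2)) := by
    rw [hkeys, PySem.List.foldl_append_if (fun k => p.2.getD k 0 != 0) (fun k => k)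
      (PySem.Set.ofList A1) []]
    have hfc : (PySem.Set.ofList A1).filter (fun k => p.2.getD k 0 != 0) =
        (PySem.Set.ofList A1).filter (fun k => !decide (k ∈ A2)) := by
      apply List.filter_congr
      intro k hk
      have hk1 : k ∈ A1 := (PySem.Set.mem_ofList A1 k).mp hk
      rw [hgd k]
      by_cases h2 : k ∈ A2
      · simp [h2, hk1]
      · have hcz : A1.count k ≠ 0 := fun h => (List.count_eq_zero.mp h) hk1
        simp [h2, hk1, hcz]
    simpa using hfc
  rw [hrem, PySem.List.foldl_append_eq_flatMap
    (fun e => PySem.List.pyRepeat [e] (p.2.getD e 0)) _ p.1, hp1]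
  congr 1
  apply List.flatMap_congr
  intro e he
  have he' : e ∈ (PySem.Set.ofList A1).filter (fun k => !decide (k ∈ A2)) := by
    rw [← PySem.List.mem_sorted (key := fun x => x) (rev := false)]
    exact he
  have h1 : e ∈ A1 := (PySem.Set.mem_ofList A1 e).mp (List.mem_filter.mp he').1
  have h2 : e ∉ A2 := by simpa using (List.mem_filter.mp he').2
  rw [PySem.List.pyRepeat_singleton, hgd e]
  simp [pvBlock, h2]

lemma pvA_pairwise (A1 A2 : List Int) :
    ((PySem.Set.ofList A2).flatMap (pvBlock A1) ++
      (PySem.List.sorted ((PySem.Set.ofList A1).filter (fun k => !decide (k ∈ A2))) (fun x => x) false).flatMap (pvBlock A1)).Pairwise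
      (fun a b => pvKey A2 a ≤ pvKey A2 b) := by
  rw [List.pairwise_append]
  refine ⟨?_, ?_, ?_⟩
  · rw [List.pairwise_flatMap]
    refine ⟨fun e _ => pvRepPairwise A2 _ e, ?_⟩
    refine List.Pairwise.imp_of_mem ?_ (pvOfList_idxOf A2)
    intro a b ha hb hlt x hxa y hyb
    rw [List.eq_of_mem_replicate hxa, List.eq_of_mem_replicate hyb]
    have haA2 : a ∈ A2 := (PySem.Set.mem_ofList A2 a).mp ha
    have hbA2 : b ∈ A2 := (PySem.Set.mem_ofList A2 b).mp hb
    apply le_of_lt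
    show pvKey A2 a < pvKey A2 b
    simp only [pvKey, if_pos haA2, if_pos hbA2]
    rw [Prod.Lex.lt_iff]
    left
    simpa using hlt
  · rw [List.pairwise_flatMap]
    refine ⟨fun e _ => pvRepPairwise A2 _ e, ?_⟩
    refine List.Pairwise.imp_of_mem ?_
      (PySem.List.sorted_pairwise ((PySem.Set.ofList A1).filter (fun k => !decide (k ∈ A2))) (fun x => x))
    intro a b ha hb hab x hxa y hyb
    rw [List.eq_of_mem_replicate hxa, List.eq_of_mem_replicate hyb]
    have hna : a ∉ A2 := by
      have ha' : a ∈ (PySem.Set.ofList A1).filter (fun k => !decide (k ∈ A2)) := by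
        rw [← PySem.List.mem_sorted (key := fun x => x) (rev := false)]; exact ha
      simpa using (List.mem_filter.mp ha').2
    have hnb : b ∉ A2 := by
      have hb' : b ∈ (PySem.Set.ofList A1).filter (fun k => !decide (k ∈ A2)) := by
        rw [← PySem.List.mem_sorted (key := fun x => x) (rev := false)]; exact hb
      simpa using (List.mem_filter.mp hb').2
    show pvKey A2 a ≤ pvKey A2 b
    simp only [pvKey, if_neg hna, if_neg hnb]
    rcases lt_or_eq_of_le hab with h | h
    · apply le_of_lt
      rw [Prod.Lex.lt_iff]
      right
      exact ⟨rfl, h⟩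
    · exact le_of_eq (by rw [h])
  · intro x hx y hy
    rcases List.mem_flatMap.mp hx with ⟨a, ha, hxa⟩
    rcases List.mem_flatMap.mp hy with ⟨b, hb, hyb⟩
    rw [List.eq_of_mem_replicate hxa, List.eq_of_mem_replicate hyb]
    have haA2 : a ∈ A2 := (PySem.Set.mem_ofList A2 a).mp ha
    have hnb : b ∉ A2 := by
      have hb' : b ∈ (PySem.Set.ofList A1).filter (fun k => !decide (k ∈ A2)) := by
        rw [← PySem.List.mem_sorted (key := fun x => x) (rev := false)]; exact hb
      simpa using (List.mem_filter.mp hb').2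
    apply le_of_lt
    show pvKey A2 a < pvKey A2 b
    simp only [pvKey, if_pos haA2, if_neg hnb]
    rw [Prod.Lex.lt_iff]
    left
    simpa using List.idxOf_lt_length_of_mem haA2

lemma pvA_perm (A1 A2 : List Int) :
    ((PySem.Set.ofList A2).flatMap (pvBlock A1) ++
      (PySem.List.sorted ((PySem.Set.ofList A1).filter (fun k => !decide (k ∈ A2))) (fun x => x) false).flatMap (pvBlock A1)).Perm A1 := by
  rw [List.perm_iff_count]
  intro v
  rw [List.count_append]
  have hfun : pvBlock A1 = fun e => List.replicate (A1.count e) e := rfl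
  have hnd2 : (PySem.List.sorted ((PySem.Set.ofList A1).filter (fun k => !decide (k ∈ A2)))
      (fun x => x) false).Nodup :=
    (PySem.List.sorted_perm _ _ _).nodup_iff.mpr
      (List.Nodup.filter _ (PySem.Set.nodup_ofList A1))
  rw [hfun, pvCount_flatMap_blocks (fun e => A1.count e) (PySem.Set.ofList A2) v
      (PySem.Set.nodup_ofList A2),
    pvCount_flatMap_blocks (fun e => A1.count e) _ v hnd2]
  have hm2 : (v ∈ PySem.List.sorted ((PySem.Set.ofList A1).filter (fun k => !decide (k ∈ A2)))
      (fun x => x) false) ↔ (v ∈ A1 ∧ ¬ v ∈ A2) := by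
    rw [PySem.List.mem_sorted]
    simp [List.mem_filter, PySem.Set.mem_ofList]
  by_cases h2 : v ∈ A2
  · simp [PySem.Set.mem_ofList, hm2, h2]
  · by_cases h1 : v ∈ A1
    · simp [PySem.Set.mem_ofList, hm2, h1, h2]
    · simp [PySem.Set.mem_ofList, hm2, h1, h2, List.count_eq_zero.mpr h1]

-- ===== VERDICT (by name: the statement is the Claim_ definition above) =====
theorem relativeSort_spec : Claim_equal_relativeSort := by
  intro A1 N A2 M _
  unfold Spec_relativeSort
  rw [pvA_eq A1 N A2 M, pvAlt_eq A1 N A2 M]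
  exact PySem.List.eq_of_perm_of_pairwise_le_of_injective (pvKey A2) (pvKey_injective A2)
    ((pvA_perm A1 A2).trans (PySem.List.sorted_perm A1 (pvKey A2) false).symm)
    (pvA_pairwise A1 A2)
    (PySem.List.sorted_pairwise A1 (pvKey A2))
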